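-- pv_equiv track=rewrite | github.com/nkp-gfg/python-fe | backend/api/routes/changes.py | _calculate_flight_stats
-- ===== SOURCE A (Python) =====
-- def _calculate_flight_stats(changes: list) -> dict:
--     """Calculate summary statistics from changes."""
--     stats = {
--         "totalChanges": len(changes),
--         "checkedIn": 0,
--         "boarded": 0,
--         "upgrades": 0,
--         "seatChanges": 0,
--         "statusChanges": 0,
--     }
--
--     for c in changes:
--         ct = c.get("changeType", "")
--         if ct == "CHECKED_IN":
--             stats["checkedIn"] += 1
--         elif ct == "BOARDED":
--             stats["boarded"] += 1
--         elif ct in ("CABIN_CHANGE", "CLASS_CHANGE", "UPGRADE_CONFIRMED"):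
--             stats["upgrades"] += 1
--         elif ct == "SEAT_CHANGE":
--             stats["seatChanges"] += 1
--         elif ct == "STATUS_CHANGE":
--             stats["statusChanges"] += 1
--
--     return stats
-- ===== SOURCE B (Python) =====
-- def _calculate_flight_stats(changes: list) -> dict:
--     """Calculate summary statistics from changes (count table, then project)."""
--     counts = {}
--     for c in changes:
--         ct = c.get("changeType", "")
--         counts[ct] = counts.get(ct, 0) + 1
--     return {
--         "totalChanges": len(changes),
--         "checkedIn": counts.get("CHECKED_IN", 0),
--         "boarded": counts.get("BOARDED", 0),
--         "upgrades": counts.get("CABIN_CHANGE", 0)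
--         + counts.get("CLASS_CHANGE", 0)
--         + counts.get("UPGRADE_CONFIRMED", 0),
--         "seatChanges": counts.get("SEAT_CHANGE", 0),
--         "statusChanges": counts.get("STATUS_CHANGE", 0),
--     }
-- ===== Notes on version B (the rewrite author's own statement) =====
-- stated objective: alternative
-- what changed: Replaces the single branchy if/elif scan with a two-phase computation: one pass builds a count table of changeType values, then the stats dict is projected directly from that table.
import Mathlib
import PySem

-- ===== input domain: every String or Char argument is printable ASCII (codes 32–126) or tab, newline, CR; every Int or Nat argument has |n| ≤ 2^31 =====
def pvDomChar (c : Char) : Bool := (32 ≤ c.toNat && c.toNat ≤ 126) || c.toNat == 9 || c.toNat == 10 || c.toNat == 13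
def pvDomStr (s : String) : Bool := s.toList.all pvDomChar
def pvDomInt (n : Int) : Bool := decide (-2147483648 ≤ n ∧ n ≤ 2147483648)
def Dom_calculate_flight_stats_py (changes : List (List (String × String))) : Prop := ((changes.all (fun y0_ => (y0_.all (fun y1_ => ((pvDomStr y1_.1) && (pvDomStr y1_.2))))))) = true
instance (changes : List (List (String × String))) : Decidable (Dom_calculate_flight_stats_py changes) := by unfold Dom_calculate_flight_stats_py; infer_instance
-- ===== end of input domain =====

-- B replaces A's branchy single scan by a count table built in one pass plus a direct projection from it (objective: alternative).

-- shared helper: c.get(k, d) on an association-list dict (first match)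
def pyDictGetD (c : List (String × String)) (k d : String) : String :=
  match c.find? (fun p => p.1 == k) with
  | some p => p.2
  | none => d

-- ===== PORT A =====
-- loop body of A's for-loop
def stepA (stats : PySem.Dict String Int) (c : List (String × String)) : PySem.Dict String Int :=
  let ct := pyDictGetD c "changeType" ""
  if ct = "CHECKED_IN" then stats.modify "checkedIn" 0 (· + 1)
  else if ct = "BOARDED" then stats.modify "boarded" 0 (· + 1)
  else if ct = "CABIN_CHANGE" ∨ ct = "CLASS_CHANGE" ∨ ct = "UPGRADE_CONFIRMED" then
    stats.modify "upgrades" 0 (· + 1)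
  else if ct = "SEAT_CHANGE" then stats.modify "seatChanges" 0 (· + 1)
  else if ct = "STATUS_CHANGE" then stats.modify "statusChanges" 0 (· + 1)
  else stats

def calculate_flight_stats_py (changes : List (List (String × String))) : List (String × Int) :=
  let stats0 : PySem.Dict String Int := PySem.Dict.ofList
    [("totalChanges", PySem.List.len changes), ("checkedIn", 0), ("boarded", 0),
     ("upgrades", 0), ("seatChanges", 0), ("statusChanges", 0)]
  let stats := changes.foldl stepA stats0
  stats.items

-- ===== PORT B =====
def calculate_flight_stats_py_alt (changes : List (List (String × String))) : List (String × Int) :=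
  let counts : PySem.Dict String Int := changes.foldl (fun d c =>
    let ct := pyDictGetD c "changeType" ""
    d.insert ct (d.getD ct 0 + 1)) PySem.Dict.empty
  [("totalChanges", PySem.List.len changes),
   ("checkedIn", counts.getD "CHECKED_IN" 0),
   ("boarded", counts.getD "BOARDED" 0),
   ("upgrades", counts.getD "CABIN_CHANGE" 0 + counts.getD "CLASS_CHANGE" 0
      + counts.getD "UPGRADE_CONFIRMED" 0),
   ("seatChanges", counts.getD "SEAT_CHANGE" 0),
   ("statusChanges", counts.getD "STATUS_CHANGE" 0)]

-- ===== PRECONDITION & SPEC =====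
def Spec_calculate_flight_stats_py (changes : List (List (String × String))) (out : List (String × Int)) : Prop := out = calculate_flight_stats_py_alt changes
instance (changes : List (List (String × String))) (out : List (String × Int)) : Decidable (Spec_calculate_flight_stats_py changes out) := by unfold Spec_calculate_flight_stats_py; infer_instance

-- ===== CLAIM (what is proved, stated in full; the proofs are below) =====
def Claim_equal_calculate_flight_stats_py : Prop := ∀ (changes : List (List (String × String))), Dom_calculate_flight_stats_py changes → Spec_calculate_flight_stats_py changes (calculate_flight_stats_py changes)

-- ===== LEMMAS AND PROOFS =====

-- the six-key stats dict of A's loop, with symbolic values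
def statsD (t a b u s st : Int) : PySem.Dict String Int :=
  PySem.Dict.mk [("totalChanges", t), ("checkedIn", a), ("boarded", b),
                 ("upgrades", u), ("seatChanges", s), ("statusChanges", st)]

def ctOf (c : List (String × String)) : String := pyDictGetD c "changeType" ""

theorem loopA (l : List (List (String × String))) (t a b u s st : Int) :
    l.foldl stepA (statsD t a b u s st)
    = statsD t (a + ((l.map ctOf).count "CHECKED_IN" : Int))
               (b + ((l.map ctOf).count "BOARDED" : Int))
               (u + ((l.map ctOf).count "CABIN_CHANGE" : Int)
                  + ((l.map ctOf).count "CLASS_CHANGE" : Int)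
                  + ((l.map ctOf).count "UPGRADE_CONFIRMED" : Int))
               (s + ((l.map ctOf).count "SEAT_CHANGE" : Int))
               (st + ((l.map ctOf).count "STATUS_CHANGE" : Int)) := by
  induction l generalizing t a b u s st with
  | nil => simp [statsD]
  | cons x xs ih =>
    rw [List.foldl_cons, List.map_cons]
    have hct : pyDictGetD x "changeType" "" = ctOf x := rfl
    by_cases h1 : ctOf x = "CHECKED_IN"
    · have e : stepA (statsD t a b u s st) x = statsD t (a + 1) b u s st := by
        simp [stepA, hct, h1, statsD, PySem.Dict.modify, PySem.Dict.get?,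
              PySem.Dict.insert, PySem.Dict.getD]
      rw [e, ih]
      simp [statsD, List.count_cons, h1]
      omega
    · by_cases h2 : ctOf x = "BOARDED"
      · have e : stepA (statsD t a b u s st) x = statsD t a (b + 1) u s st := by
          simp [stepA, hct, h1, h2, statsD, PySem.Dict.modify, PySem.Dict.get?,
                PySem.Dict.insert, PySem.Dict.getD]
        rw [e, ih]
        simp [statsD, List.count_cons, h2, Ne.symm h1]
        omega
      · by_cases h3 : ctOf x = "CABIN_CHANGE" ∨ ctOf x = "CLASS_CHANGE" ∨ ctOf x = "UPGRADE_CONFIRMED"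
        · have e : stepA (statsD t a b u s st) x = statsD t a b (u + 1) s st := by
            simp [stepA, hct, h1, h2, h3, statsD, PySem.Dict.modify, PySem.Dict.get?,
                  PySem.Dict.insert, PySem.Dict.getD]
          rw [e, ih]
          rcases h3 with h3 | h3 | h3 <;>
            simp [statsD, List.count_cons, h3, Ne.symm h1, Ne.symm h2] <;> omega
        · by_cases h4 : ctOf x = "SEAT_CHANGE"
          · have e : stepA (statsD t a b u s st) x = statsD t a b u (s + 1) st := by
              simp [stepA, hct, h1, h2, h3, h4, statsD, PySem.Dict.modify, PySem.Dict.get?,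
                    PySem.Dict.insert, PySem.Dict.getD]
            rw [e, ih]
            push Not at h3
            simp [statsD, List.count_cons, h4, Ne.symm h1, Ne.symm h2,
                  Ne.symm h3.1, Ne.symm h3.2.1, Ne.symm h3.2.2]
            omega
          · by_cases h5 : ctOf x = "STATUS_CHANGE"
            · have e : stepA (statsD t a b u s st) x = statsD t a b u s (st + 1) := by
                simp [stepA, hct, h1, h2, h3, h4, h5, statsD, PySem.Dict.modify, PySem.Dict.get?,
                      PySem.Dict.insert, PySem.Dict.getD]
              rw [e, ih]
              push Not at h3
              simp [statsD, List.count_cons, h5, Ne.symm h1, Ne.symm h2,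
                    Ne.symm h3.1, Ne.symm h3.2.1, Ne.symm h3.2.2, Ne.symm h4]
              omega
            · have e : stepA (statsD t a b u s st) x = statsD t a b u s st := by
                simp [stepA, hct, h1, h2, h3, h4, h5]
              rw [e, ih]
              push Not at h3
              simp [statsD, List.count_cons, h1, h2, h3.1, h3.2.1, h3.2.2, h4, h5]

-- B's count loop over any starting dict adds the count of each changeType value
theorem countB (l : List (List (String × String))) (d : PySem.Dict String Int) (v : String) :
    (l.foldl (fun d c =>
      let ct := pyDictGetD c "changeType" ""
      d.insert ct (d.getD ct 0 + 1)) d).getD v 0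
    = d.getD v 0 + ((l.map ctOf).count v : Int) := by
  induction l generalizing d with
  | nil => simp
  | cons x xs ih =>
    simp only [List.foldl_cons, List.map_cons, List.count_cons]
    rw [ih]
    have hct : pyDictGetD x "changeType" "" = ctOf x := rfl
    rw [hct, PySem.Dict.getD_insert]
    by_cases hv : v = ctOf x
    · simp [hv]; omega
    · simp [hv]; exact fun h => hv h.symm

-- ===== VERDICT (by name: the statement is the Claim_ definition above) =====
theorem calculate_flight_stats_py_spec : Claim_equal_calculate_flight_stats_py := by
  intro changes _
  unfold Spec_calculate_flight_stats_py
  have h0 : PySem.Dict.ofList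
      [("totalChanges", PySem.List.len changes), ("checkedIn", (0:Int)), ("boarded", 0),
       ("upgrades", 0), ("seatChanges", 0), ("statusChanges", 0)]
      = statsD (PySem.List.len changes) 0 0 0 0 0 := by
    apply PySem.Dict.ext
    simp [PySem.Dict.ofList, PySem.Dict.update, PySem.Dict.insert, PySem.Dict.contains,
          PySem.Dict.empty, statsD]
  simp only [calculate_flight_stats_py, calculate_flight_stats_py_alt]
  rw [h0, loopA]
  simp [statsD, countB, PySem.Dict.getD_empty]
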